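-- pv_equiv track=rewrite | github.com/lutzroeder/netron | tools/sklearn-script.py | split_docstring
-- ===== SOURCE A (Python) =====
-- def split_docstring(docstring):
--     headers = {}
--     current_header = ''
--     current_lines = []
--     lines = docstring.split('\n')
--     index = 0
--     while index < len(lines):
--         if index + 1 < len(lines) and len(lines[index + 1].strip(' ')) > 0 and len(lines[index + 1].strip(' ').strip('-')) == 0:
--             headers[current_header] = current_lines
--             current_header = lines[index].strip(' ')
--             current_lines = []
--             index = index + 1
--         else:
--             current_lines.append(lines[index])
--         index = index + 1
--     headers[current_header] = current_lines
--     return headers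
-- ===== SOURCE B (Python) =====
-- def split_docstring(docstring):
--     headers = {}
--     current_header = ''
--     current_lines = []
--     for line in docstring.split('\n'):
--         s = line.strip(' ')
--         if s and not s.strip('-') and current_lines:
--             header_line = current_lines.pop()
--             headers[current_header] = current_lines
--             current_header = header_line.strip(' ')
--             current_lines = []
--         else:
--             current_lines.append(line)
--     headers[current_header] = current_lines
--     return headers
-- ===== Notes on version B (the rewrite author's own statement) =====
-- stated objective: simpler
-- what changed: B replaces A's look-ahead index loop (peek at lines[index+1] and skip the underline with index+2) by a single plain for-loop over the lines that, on seeing an underline, pops the previously accumulated line as the new section header (look-behind).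
import Mathlib
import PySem

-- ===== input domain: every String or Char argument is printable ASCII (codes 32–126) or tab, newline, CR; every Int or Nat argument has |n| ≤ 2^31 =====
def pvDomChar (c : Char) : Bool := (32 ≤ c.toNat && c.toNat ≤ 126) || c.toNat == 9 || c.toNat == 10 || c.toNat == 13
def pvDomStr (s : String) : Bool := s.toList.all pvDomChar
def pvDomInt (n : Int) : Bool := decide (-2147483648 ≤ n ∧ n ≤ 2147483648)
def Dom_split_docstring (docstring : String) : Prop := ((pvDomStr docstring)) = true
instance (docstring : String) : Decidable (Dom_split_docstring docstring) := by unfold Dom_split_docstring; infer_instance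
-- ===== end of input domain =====

-- B replaces A's look-ahead index loop (peek at lines[index+1], skip the underline) by a single
-- plain for-loop with look-behind: on an underline it pops the previous line as the new header.
-- Objective: simpler (no index arithmetic); same O(n) cost.

-- ===== PORT A =====
-- docstring.split("\\n"): split? with the literal nonempty separator is always `some`; .getD [] is exact here.
-- while loop over `index` ported as recursion on `index` (decreasing measure lines.length - index);
-- lines[index] is ported as List.getD (exact here: every access is guarded to be in range).
def split_docstring_goA (lines : List String) (headers : PySem.Dict String (List String))
    (current_header : String) (current_lines : List String) (index : Nat) :
    PySem.Dict String (List String) :=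
  if h : index < lines.length then
    if decide (index + 1 < lines.length) &&
       (decide (0 < PySem.Str.len (PySem.Str.stripChars (lines.getD (index + 1) "") " ")) &&
        decide (PySem.Str.len (PySem.Str.stripChars (PySem.Str.stripChars (lines.getD (index + 1) "") " ") "-") = 0)) then
      split_docstring_goA lines (headers.insert current_header current_lines)
        (PySem.Str.stripChars (lines.getD index "") " ") [] (index + 2)
    else
      split_docstring_goA lines headers current_header (current_lines ++ [lines.getD index ""]) (index + 1)
  else
    headers.insert current_header current_lines
termination_by lines.length - index
decreasing_by all_goals omega

def split_docstring (docstring : String) : List (String × List String) :=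
  (split_docstring_goA (((PySem.Str.split? docstring "\n").getD [])) PySem.Dict.empty "" [] 0).items

-- ===== PORT B =====
-- for-loop over the lines; `current_lines.pop()` on the guarded nonempty list is ported as
-- getLastD/dropLast (exact: the guard `!current_lines.isEmpty` makes pop total).
def split_docstring_goB (headers : PySem.Dict String (List String))
    (current_header : String) (current_lines : List String) :
    List String → PySem.Dict String (List String)
  | [] => headers.insert current_header current_lines
  | line :: rest =>
    let s := PySem.Str.stripChars line " "
    if (decide (0 < PySem.Str.len s) && decide (PySem.Str.len (PySem.Str.stripChars s "-") = 0)) &&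
       !current_lines.isEmpty then
      split_docstring_goB (headers.insert current_header current_lines.dropLast)
        (PySem.Str.stripChars (current_lines.getLastD "") " ") [] rest
    else
      split_docstring_goB headers current_header (current_lines ++ [line]) rest

def split_docstring_alt (docstring : String) : List (String × List String) :=
  (split_docstring_goB PySem.Dict.empty "" [] (((PySem.Str.split? docstring "\n").getD []))).items

-- ===== PRECONDITION & SPEC =====
def Spec_split_docstring (docstring : String) (out : List (String × List String)) : Prop := out = split_docstring_alt docstring
instance (docstring : String) (out : List (String × List String)) : Decidable (Spec_split_docstring docstring out) := by unfold Spec_split_docstring; infer_instance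

-- ===== CLAIM (what is proved, stated in full; the proofs are below) =====
def Claim_equal_split_docstring : Prop := ∀ (docstring : String), Dom_split_docstring docstring → Spec_split_docstring docstring (split_docstring docstring)

-- ===== LEMMAS AND PROOFS =====

-- the shared underline test: line.strip(' ') nonempty and line.strip(' ').strip('-') empty
def pvIsU (line : String) : Bool :=
  decide (0 < PySem.Str.len (PySem.Str.stripChars line " ")) &&
  decide (PySem.Str.len (PySem.Str.stripChars (PySem.Str.stripChars line " ") "-") = 0)

-- A's loop re-expressed on the suffix of `lines` it still has to read
def pvGoA' (headers : PySem.Dict String (List String)) (current_header : String)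
    (current_lines : List String) : List String → PySem.Dict String (List String)
  | [] => headers.insert current_header current_lines
  | [l] => headers.insert current_header (current_lines ++ [l])
  | l :: next :: rest =>
    if pvIsU next then
      pvGoA' (headers.insert current_header current_lines) (PySem.Str.stripChars l " ") [] rest
    else
      pvGoA' headers current_header (current_lines ++ [l]) (next :: rest)

lemma pv_goA_cond (lines : List String) (i : Nat) (h : i + 1 < lines.length) :
    (decide (i + 1 < lines.length) &&
       (decide (0 < PySem.Str.len (PySem.Str.stripChars (lines.getD (i + 1) "") " ")) &&
        decide (PySem.Str.len (PySem.Str.stripChars (PySem.Str.stripChars (lines.getD (i + 1) "") " ") "-") = 0)))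
    = pvIsU lines[i+1] := by
  rw [List.getD_eq_getElem lines "" h]
  simp [pvIsU, h]

lemma pv_bridge : ∀ (n : Nat) (lines : List String) (i : Nat) (headers : PySem.Dict String (List String))
    (hdr : String) (cur : List String), lines.length - i ≤ n →
    split_docstring_goA lines headers hdr cur i = pvGoA' headers hdr cur (lines.drop i) := by
  intro n
  induction n with
  | zero =>
    intro lines i headers hdr cur hle
    have hge : lines.length ≤ i := by omega
    rw [split_docstring_goA, dif_neg (by omega), List.drop_eq_nil_of_le hge, pvGoA']
  | succ n ih =>
    intro lines i headers hdr cur hle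
    by_cases hi : i < lines.length
    · rw [← List.getElem_cons_drop hi]
      by_cases hi1 : i + 1 < lines.length
      · rw [← List.getElem_cons_drop hi1]
        rw [split_docstring_goA, dif_pos hi, pv_goA_cond lines i hi1]
        by_cases hu : pvIsU lines[i+1] = true
        · rw [if_pos hu, pvGoA', if_pos hu, List.getD_eq_getElem lines "" hi,
            ih lines (i+2) _ _ _ (by omega)]
        · rw [if_neg hu, pvGoA', if_neg hu, List.getD_eq_getElem lines "" hi,
            ih lines (i+1) _ _ _ (by omega), ← List.getElem_cons_drop hi1]
      · have hlast : lines.drop (i+1) = [] := List.drop_eq_nil_of_le (by omega)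
        rw [hlast]
        rw [split_docstring_goA, dif_pos hi, if_neg (by simp; omega),
          List.getD_eq_getElem lines "" hi,
          ih lines (i+1) _ _ _ (by omega), hlast, pvGoA', pvGoA']
    · rw [split_docstring_goA, dif_neg hi, List.drop_eq_nil_of_le (by omega), pvGoA']
lemma pv_goB_cons (headers : PySem.Dict String (List String)) (hdr : String)
    (cur : List String) (line : String) (rest : List String) :
    split_docstring_goB headers hdr cur (line :: rest) =
    if pvIsU line && !cur.isEmpty then
      split_docstring_goB (headers.insert hdr cur.dropLast)
        (PySem.Str.stripChars (cur.getLastD "") " ") [] rest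
    else
      split_docstring_goB headers hdr (cur ++ [line]) rest := rfl

set_option maxHeartbeats 1000000 in
lemma pv_main : ∀ (n : Nat) (ls : List String), ls.length ≤ n →
    ∀ (headers : PySem.Dict String (List String)) (hdr : String) (cur : List String),
    (∀ l, ls.head? = some l → pvIsU l = true → cur = []) →
    pvGoA' headers hdr cur ls = split_docstring_goB headers hdr cur ls := by
  intro n
  induction n with
  | zero =>
    intro ls hle headers hdr cur _
    have : ls = [] := List.eq_nil_of_length_eq_zero (by omega)
    subst this; rfl
  | succ n ih =>
    intro ls hle headers hdr cur H
    match ls with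
    | [] => rfl
    | [l] =>
      rw [pvGoA', pv_goB_cons]
      have hguard : (pvIsU l && !cur.isEmpty) = false := by
        by_cases hu : pvIsU l = true
        · have : cur = [] := H l rfl hu
          simp [this]
        · simp [Bool.eq_false_iff.mpr hu]
      rw [if_neg (by simp [hguard])]
      rfl
    | l :: next :: rest =>
      have hstep1 : split_docstring_goB headers hdr cur (l :: next :: rest) =
          split_docstring_goB headers hdr (cur ++ [l]) (next :: rest) := by
        rw [pv_goB_cons]
        have hguard : (pvIsU l && !cur.isEmpty) = false := by
          by_cases hu : pvIsU l = true
          · have : cur = [] := H l rfl hu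
            simp [this]
          · simp [Bool.eq_false_iff.mpr hu]
        rw [if_neg (by simp [hguard])]
      by_cases hu : pvIsU next = true
      · rw [pvGoA', if_pos hu, hstep1, pv_goB_cons,
          if_pos (by simp [hu]),
          List.dropLast_concat, List.getLastD_concat]
        exact ih rest (by simp at hle ⊢; omega) _ _ _ (fun _ _ _ => rfl)
      · rw [pvGoA', if_neg hu, hstep1]
        refine ih (next :: rest) (by simp at hle ⊢; omega) _ _ _ ?_
        intro l' h' hu'
        simp only [List.head?_cons, Option.some.injEq] at h'
        subst h'
        exact absurd hu' hu


-- ===== VERDICT (by name: the statement is the Claim_ definition above) =====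
theorem split_docstring_spec : Claim_equal_split_docstring := by
  intro docstring _
  unfold Spec_split_docstring split_docstring split_docstring_alt
  have h1 := pv_bridge (((PySem.Str.split? docstring "\n").getD [])).length (((PySem.Str.split? docstring "\n").getD [])) 0 PySem.Dict.empty "" [] (by omega)
  rw [List.drop_zero] at h1
  rw [h1, pv_main (((PySem.Str.split? docstring "\n").getD [])).length _ le_rfl _ _ _ (fun _ _ _ => rfl)]
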